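-- pv_equiv track=rewrite | github.com/impedance/html2md | src/doc2md/validators.py | validate_component_list_punctuation
-- ===== SOURCE A (Python) =====
-- from typing import List
--
-- def validate_component_list_punctuation(markdown: str) -> List[str]:
--     """Ensure component lists use ';' and '.' punctuation."""
--     warnings: List[str] = []
--     lines = markdown.splitlines()
--     i = 0
--     while i < len(lines):
--         if lines[i].startswith("- "):
--             start = i
--             while i < len(lines) and lines[i].startswith("- "):
--                 i += 1
--             group = lines[start:i]
--             for j, item in enumerate(group):
--                 text = item.rstrip()
--                 if j < len(group) - 1:
--                     if not text.endswith(";"):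
--                         warnings.append(f"List item should end with ';': {item}")
--                 else:
--                     if not text.endswith("."):
--                         warnings.append(f"Last list item should end with '.': {item}")
--             continue
--         i += 1
--     return warnings
-- ===== SOURCE B (Python) =====
-- from typing import List
--
-- def validate_component_list_punctuation(markdown: str) -> List[str]:
--     """Ensure component lists use ';' and '.' punctuation."""
--     warnings: List[str] = []
--     lines = markdown.splitlines()
--     for line, nxt in zip(lines, lines[1:] + [None]):
--         if line.startswith("- "):
--             text = line.rstrip()
--             if nxt is not None and nxt.startswith("- "):
--                 if not text.endswith(";"):
--                     warnings.append(f"List item should end with ';': {line}")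
--             else:
--                 if not text.endswith("."):
--                     warnings.append(f"Last list item should end with '.': {line}")
--     return warnings
-- ===== Notes on version B (the rewrite author's own statement) =====
-- stated objective: simpler
-- what changed: Replaced A's nested while-loops (group scanning plus an inner enumerate pass over each group slice) by one flat pass that pairs every line with its successor and decides last-of-run by whether the next line starts a list item.
import Mathlib
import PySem

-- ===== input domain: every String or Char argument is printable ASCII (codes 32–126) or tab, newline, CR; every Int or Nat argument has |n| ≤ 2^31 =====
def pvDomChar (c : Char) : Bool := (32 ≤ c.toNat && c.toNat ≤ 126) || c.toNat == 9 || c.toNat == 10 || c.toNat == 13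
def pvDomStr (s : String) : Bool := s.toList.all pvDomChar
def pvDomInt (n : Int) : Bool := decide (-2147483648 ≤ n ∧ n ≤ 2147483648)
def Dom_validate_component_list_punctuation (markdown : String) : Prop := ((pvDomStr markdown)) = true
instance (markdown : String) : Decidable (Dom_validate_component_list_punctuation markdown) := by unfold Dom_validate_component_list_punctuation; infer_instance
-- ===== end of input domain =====

-- B replaces A's nested while-loops over group slices by one flat successor-paired pass; objective: simpler.

-- ===== PORT A =====
-- inner `while i < len(lines) and lines[i].startswith("- "): i += 1`
def pvScanEnd (lines : List String) (i : Nat) : Nat :=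
  if h : i < lines.length then
    if PySem.Str.startswith lines[i] "- " then pvScanEnd lines (i + 1) else i
  else i
termination_by lines.length - i

theorem pvScanEnd_ge (lines : List String) (i : Nat) : i ≤ pvScanEnd lines i := by
  fun_induction pvScanEnd lines i with
  | case1 i h hs ih => omega
  | case2 i h hs => omega
  | case3 i h => omega

-- `for j, item in enumerate(group): …` appending warnings
def pvGroupWarns (group : List String) (warnings : List String) : List String :=
  (PySem.List.enumerate group 0).foldl (fun w ji =>
    let text := PySem.Str.rstrip ji.2
    if ji.1 < PySem.List.len group - 1 then
      if !(PySem.Str.endswith text ";") then w ++ ["List item should end with ';': " ++ ji.2] else w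
    else
      if !(PySem.Str.endswith text ".") then w ++ ["Last list item should end with '.': " ++ ji.2] else w)
    warnings

-- outer `while i < len(lines): …`
def pvALoop (lines : List String) (i : Nat) (warnings : List String) : List String :=
  if h : i < lines.length then
    if PySem.Str.startswith lines[i] "- " then
      let e := pvScanEnd lines i
      pvALoop lines e
        (pvGroupWarns (PySem.List.slice lines (some (i : Int)) (some (e : Int))) warnings)
    else pvALoop lines (i + 1) warnings
  else warnings
termination_by lines.length - i
decreasing_by
  · rename_i hs
    have h1 : i + 1 ≤ pvScanEnd lines (i + 1) := pvScanEnd_ge lines (i + 1)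
    have h2 : pvScanEnd lines i = pvScanEnd lines (i + 1) := by
      conv_lhs => rw [pvScanEnd.eq_def]
      rw [dif_pos h, if_pos hs]
    omega
  · omega

def validate_component_list_punctuation (markdown : String) : List String :=
  pvALoop (PySem.Str.splitlines markdown) 0 []

-- ===== PORT B =====
-- `zip(lines, lines[1:] + [None])`
def pvZipNext : List String → List (String × Option String)
  | [] => []
  | [x] => [(x, none)]
  | x :: y :: rest => (x, some y) :: pvZipNext (y :: rest)

def validate_component_list_punctuation_alt (markdown : String) : List String :=
  (pvZipNext (PySem.Str.splitlines markdown)).foldl (fun w p =>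
    if PySem.Str.startswith p.1 "- " then
      let text := PySem.Str.rstrip p.1
      if (match p.2 with | some nxt => PySem.Str.startswith nxt "- " | none => false) then
        if !(PySem.Str.endswith text ";") then w ++ ["List item should end with ';': " ++ p.1] else w
      else
        if !(PySem.Str.endswith text ".") then w ++ ["Last list item should end with '.': " ++ p.1] else w
    else w) []

-- ===== PRECONDITION & SPEC =====
def Spec_validate_component_list_punctuation (markdown : String) (out : List String) : Prop := out = validate_component_list_punctuation_alt markdown
instance (markdown : String) (out : List String) : Decidable (Spec_validate_component_list_punctuation markdown out) := by unfold Spec_validate_component_list_punctuation; infer_instance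

-- ===== CLAIM (what is proved, stated in full; the proofs are below) =====
def Claim_equal_validate_component_list_punctuation : Prop := ∀ (markdown : String), Dom_validate_component_list_punctuation markdown → Spec_validate_component_list_punctuation markdown (validate_component_list_punctuation markdown)

-- ===== LEMMAS AND PROOFS =====

-- abbreviations used only by the proofs
def pvP (l : String) : Bool := PySem.Str.startswith l "- "

def pvSemi (x : String) : List String :=
  if !(PySem.Str.endswith (PySem.Str.rstrip x) ";") then ["List item should end with ';': " ++ x] else []

def pvDot (x : String) : List String :=
  if !(PySem.Str.endswith (PySem.Str.rstrip x) ".") then ["Last list item should end with '.': " ++ x] else []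

-- per-item contribution of A's inner enumerate loop
def pvContribA (n : Int) (ji : Int × String) : List String :=
  if ji.1 < n - 1 then pvSemi ji.2 else pvDot ji.2

-- per-pair contribution of B's loop
def pvContribB (p : String × Option String) : List String :=
  if pvP p.1 then
    if (match p.2 with | some nxt => pvP nxt | none => false) then pvSemi p.1 else pvDot p.1
  else []

def pvBFlat (l : List String) : List String := (pvZipNext l).flatMap pvContribB

-- the common "group" shape: all but the last get the ';' check, the last the '.' check
def pvGW : List String → List String
  | [] => []
  | [x] => pvDot x
  | x :: y :: rest => pvSemi x ++ pvGW (y :: rest)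

theorem pvFoldl_eq_flatMap {α : Type} (f : List String → α → List String) (g : α → List String)
    (hf : ∀ w x, f w x = w ++ g x) : ∀ (l : List α) (w : List String), l.foldl f w = w ++ l.flatMap g := by
  intro l
  induction l with
  | nil => simp
  | cons x xs ih => intro w; simp [List.foldl_cons, hf, ih, List.flatMap_cons]

theorem pvGroupWarns_eq (group warnings : List String) :
    pvGroupWarns group warnings = warnings ++ (PySem.List.enumerate group 0).flatMap (pvContribA (PySem.List.len group)) := by
  unfold pvGroupWarns
  apply pvFoldl_eq_flatMap
  intro w ji
  unfold pvContribA pvSemi pvDot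
  split_ifs <;> simp_all

theorem pvAlt_eq (markdown : String) :
    validate_component_list_punctuation_alt markdown = pvBFlat (PySem.Str.splitlines markdown) := by
  unfold validate_component_list_punctuation_alt pvBFlat
  rw [pvFoldl_eq_flatMap _ pvContribB]
  · simp
  · intro w p
    unfold pvContribB pvSemi pvDot pvP
    split_ifs <;> simp_all

theorem pvZipNext_cons (x : String) (rest : List String) :
    pvZipNext (x :: rest) = (x, rest.head?) :: pvZipNext rest := by
  cases rest <;> simp [pvZipNext]

theorem pvBFlat_cons (x : String) (rest : List String) :
    pvBFlat (x :: rest) = pvContribB (x, rest.head?) ++ pvBFlat rest := by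
  unfold pvBFlat
  rw [pvZipNext_cons]
  simp [List.flatMap_cons]

-- A's enumerate pass over any group equals the structural group shape pvGW
theorem pvEnumFlat_all_semi (ys : List String) : ∀ (s n : Int), s + ys.length ≤ n - 1 →
    (PySem.List.enumerate ys s).flatMap (pvContribA n) = ys.flatMap pvSemi := by
  induction ys with
  | nil => intro s n _; simp [PySem.List.enumerate_nil]
  | cons x xs ih =>
    intro s n h
    rw [PySem.List.enumerate_cons]
    simp only [List.flatMap_cons]
    have hx : pvContribA n (s, x) = pvSemi x := by
      unfold pvContribA
      have : s < n - 1 := by simp at h; omega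
      simp [this]
    rw [hx, ih (s + 1) n (by simp at h ⊢; omega)]

theorem pvGW_concat (ys : List String) (x : String) :
    pvGW (ys ++ [x]) = ys.flatMap pvSemi ++ pvDot x := by
  induction ys with
  | nil => simp [pvGW]
  | cons a ys ih =>
    cases ys with
    | nil => simp [pvGW]
    | cons b ys => simp only [List.cons_append, pvGW, List.flatMap_cons] at ih ⊢; simp [ih]

theorem pvAFlat_eq_gw (g : List String) :
    (PySem.List.enumerate g 0).flatMap (pvContribA (PySem.List.len g)) = pvGW g := by
  rcases List.eq_nil_or_concat g with h | ⟨ys, x, rfl⟩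
  · simp [h, PySem.List.enumerate_nil, pvGW]
  · simp only [List.concat_eq_append]
    rw [PySem.List.enumerate_append, pvGW_concat]
    simp only [PySem.List.enumerate_cons, PySem.List.enumerate_nil, List.flatMap_append,
      List.flatMap_cons, List.flatMap_nil]
    have hlast : pvContribA (PySem.List.len (ys ++ [x])) ((0 : Int) + ys.length, x) = pvDot x := by
      unfold pvContribA
      simp [PySem.List.len_eq]
    rw [hlast, pvEnumFlat_all_semi ys 0 (PySem.List.len (ys ++ [x])) (by simp [PySem.List.len_eq])]
    simp

-- B's flat pass splits at a run boundary into the group shape plus the rest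
theorem pvBFlat_split (s : List String) :
    pvBFlat s = pvGW (s.takeWhile pvP) ++ pvBFlat (s.dropWhile pvP) := by
  induction s with
  | nil => simp [pvBFlat, pvZipNext, pvGW]
  | cons x rest ih =>
    by_cases hx : pvP x
    · rw [List.takeWhile_cons_of_pos hx, List.dropWhile_cons_of_pos hx, pvBFlat_cons]
      cases rest with
      | nil => simp [pvContribB, hx, pvGW, pvBFlat, pvZipNext]
      | cons y r =>
        by_cases hy : pvP y
        · have hc : pvContribB (x, ((y :: r) : List String).head?) = pvSemi x := by
            simp [pvContribB, hx, hy]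
          rw [hc, ih, List.takeWhile_cons_of_pos hy]
          simp [pvGW]
        · have hc : pvContribB (x, ((y :: r) : List String).head?) = pvDot x := by
            simp [pvContribB, hx, hy]
          rw [hc, List.takeWhile_cons_of_neg hy, List.dropWhile_cons_of_neg hy]
          simp [pvGW]
    · rw [List.takeWhile_cons_of_neg hx, List.dropWhile_cons_of_neg hx, pvBFlat_cons]
      have hc : pvContribB (x, rest.head?) = [] := by simp [pvContribB, hx]
      simp [hc, pvGW]

theorem pv_drop_takeWhile {α : Type} (p : α → Bool) (l : List α) :
    l.drop (l.takeWhile p).length = l.dropWhile p := by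
  induction l with
  | nil => simp
  | cons x xs ih => by_cases hx : p x <;> simp [hx, ih]

-- pvScanEnd finds the end of the run of "- " lines starting at i
theorem pvScanEnd_eq (lines : List String) (i : Nat) :
    pvScanEnd lines i = i + ((lines.drop i).takeWhile pvP).length := by
  fun_induction pvScanEnd lines i with
  | case1 i h hs ih =>
    rw [ih, List.drop_eq_getElem_cons h,
      List.takeWhile_cons_of_pos (show pvP lines[i] = true from hs)]
    simp only [List.length_cons]
    omega
  | case2 i h hs =>
    rw [List.drop_eq_getElem_cons h,
      List.takeWhile_cons_of_neg (show ¬ pvP lines[i] = true from hs)]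
    simp
  | case3 i h =>
    rw [List.drop_eq_nil_of_le (by omega)]
    simp

-- main loop invariant
theorem pvALoop_eq (lines : List String) (i : Nat) (warnings : List String) :
    pvALoop lines i warnings = warnings ++ pvBFlat (lines.drop i) := by
  fun_induction pvALoop lines i warnings with
  | case1 i warnings h hs e ih =>
    rw [ih]
    have heq : e = i + ((lines.drop i).takeWhile pvP).length := pvScanEnd_eq lines i
    set s := lines.drop i with hsdef
    set t := (s.takeWhile pvP).length with htdef
    have hslice : PySem.List.slice lines (some (i : Int)) (some (e : Int)) = s.takeWhile pvP := by
      rw [PySem.List.slice_natCast, ← hsdef, show e - i = t by omega, htdef]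
      exact ((List.prefix_iff_eq_take).1 (List.takeWhile_prefix pvP)).symm
    have hds : s.drop t = lines.drop e := by
      rw [hsdef, List.drop_drop]
      congr 1
      omega
    have hdrop : lines.drop e = s.dropWhile pvP := by
      rw [← hds, htdef]
      exact pv_drop_takeWhile pvP s
    rw [hslice, hdrop, pvGroupWarns_eq, pvAFlat_eq_gw, pvBFlat_split s]
    simp [List.append_assoc]
  | case2 i warnings h hs ih =>
    rw [ih, List.drop_eq_getElem_cons h, pvBFlat_cons]
    have hc : pvContribB (lines[i], (lines.drop (i + 1)).head?) = [] := by
      simp only [pvContribB, pvP]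
      rw [if_neg hs]
    rw [hc]
    simp
  | case3 i warnings h =>
    rw [List.drop_eq_nil_of_le (by omega)]
    simp [pvBFlat, pvZipNext]

-- ===== VERDICT (by name: the statement is the Claim_ definition above) =====
theorem validate_component_list_punctuation_spec : Claim_equal_validate_component_list_punctuation := by
  intro markdown _
  unfold Spec_validate_component_list_punctuation validate_component_list_punctuation
  rw [pvAlt_eq, pvALoop_eq]
  simp
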